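-- pv_equiv track=rewrite | github.com/miliar/Code_Jam_Webscraper | solutions_python/Problem_179/2944.py | possible_coins
-- ===== SOURCE A (Python) =====
-- def possible_coins(n):
--     """Generates a list of possible jamcoins of length n"""
--     coins = [[1]]
--     for i in range(n-2):
--         new_coins = []
--         for coin in coins:
--             new_coins.append(coin + [0])
--             new_coins.append(coin + [1])
--         coins = new_coins
--     return [coin + [1] for coin in coins]
-- ===== SOURCE B (Python) =====
-- def possible_coins(n):
--     """Generates a list of possible jamcoins of length n"""
--     def mids(k):
--         if k <= 0:
--             return [[]]
--         return [[b] + rest for b in (0, 1) for rest in mids(k - 1)]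
--     return [[1] + mid + [1] for mid in mids(n - 2)]
-- ===== Notes on version B (the rewrite author's own statement) =====
-- stated objective: idiomatic
-- what changed: Replaces A's iterative snoc-doubling of a worklist with a recursive generator of the n-2 middle bits (cons on the first bit, product-style), then one comprehension wrapping each middle in leading/trailing 1s.
import Mathlib
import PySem

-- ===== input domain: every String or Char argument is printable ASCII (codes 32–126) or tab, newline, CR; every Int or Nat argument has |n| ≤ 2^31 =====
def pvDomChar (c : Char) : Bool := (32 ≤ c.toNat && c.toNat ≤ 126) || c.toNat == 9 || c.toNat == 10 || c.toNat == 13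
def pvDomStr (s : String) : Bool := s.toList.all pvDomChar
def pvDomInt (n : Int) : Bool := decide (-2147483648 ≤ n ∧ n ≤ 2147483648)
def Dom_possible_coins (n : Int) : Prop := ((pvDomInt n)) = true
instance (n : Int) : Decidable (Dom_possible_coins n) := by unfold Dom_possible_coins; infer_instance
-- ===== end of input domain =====

-- B recursively enumerates the n-2 middle bits (first bit outermost) instead of A's
-- iterative doubling of a worklist; same results, stated as exact equivalence (idiomatic rewrite).

-- ===== PORT A =====
def possible_coins (n : Int) : List (List Int) :=
  let coins : List (List Int) :=
    (PySem.List.pyRange 0 (n - 2) 1).foldl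
      (fun coins _ =>
        coins.foldl (fun new_coins coin =>
          (new_coins ++ [coin ++ [0]]) ++ [coin ++ [1]]) [])
      [[1]]
  coins.map (fun coin => coin ++ [1])

-- ===== PORT B =====
-- mids(k): all middle-bit lists of length k, first bit varying slowest (k ≤ 0 → [[]])
def pvMids : Nat → List (List Int)
  | 0 => [[]]
  | k + 1 => [(0 : Int), 1].flatMap (fun b => (pvMids k).map (fun rest => b :: rest))

def possible_coins_alt (n : Int) : List (List Int) :=
  (pvMids (n - 2).toNat).map (fun mid => [1] ++ mid ++ [1])

-- ===== PRECONDITION & SPEC =====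
def Spec_possible_coins (n : Int) (out : List (List Int)) : Prop := out = possible_coins_alt n
instance (n : Int) (out : List (List Int)) : Decidable (Spec_possible_coins n out) := by unfold Spec_possible_coins; infer_instance

-- ===== CLAIM (what is proved, stated in full; the proofs are below) =====
def Claim_equal_possible_coins : Prop := ∀ (n : Int), Dom_possible_coins n → Spec_possible_coins n (possible_coins n)

-- ===== LEMMAS AND PROOFS =====

-- a fold whose body ignores the element is an iterate (length only matters)
theorem pvFoldl_const {α β : Type} (g : β → β) (l : List α) (init : β) :
    l.foldl (fun s _ => g s) init = g^[l.length] init := by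
  induction l generalizing init with
  | nil => simp
  | cons a t ih => simp [List.foldl_cons, ih, Function.iterate_succ_apply]

-- A's inner loop from any accumulator is an append of a flatMap
theorem pvInner_foldl (l : List (List Int)) (acc : List (List Int)) :
    l.foldl (fun nc c => (nc ++ [c ++ [0]]) ++ [c ++ [1]]) acc
      = acc ++ l.flatMap (fun c => [c ++ [0], c ++ [1]]) := by
  induction l generalizing acc with
  | nil => simp
  | cons c t ih => simp [List.foldl_cons, ih, List.flatMap_cons, List.flatMap]

-- snoc characterisation of the cons-based pvMids
theorem pvMids_succ_snoc (k : Nat) :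
    pvMids (k + 1) = (pvMids k).flatMap (fun t => [t ++ [0], t ++ [1]]) := by
  induction k with
  | zero => simp [pvMids]
  | succ k ih =>
    conv_lhs => rw [show pvMids (k + 1 + 1)
        = [(0 : Int), 1].flatMap (fun b => (pvMids (k + 1)).map (fun rest => b :: rest)) from rfl,
      ih]
    conv_rhs => rw [show pvMids (k + 1)
        = [(0 : Int), 1].flatMap (fun b => (pvMids k).map (fun rest => b :: rest)) from rfl]
    simp [List.flatMap_cons, List.map_flatMap, List.flatMap_map, List.flatMap_append]

-- A's outer loop body, iterated k times from [[1]], generates the cons-based middles with a leading 1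
theorem pvIter_eq (k : Nat) :
    (fun coins : List (List Int) =>
        coins.foldl (fun nc c => (nc ++ [c ++ [0]]) ++ [c ++ [1]]) [])^[k] [[1]]
      = (pvMids k).map (fun t => (1 : Int) :: t) := by
  induction k with
  | zero => simp [pvMids]
  | succ k ih =>
    rw [Function.iterate_succ_apply', ih, pvInner_foldl, pvMids_succ_snoc]
    simp [List.map_flatMap, List.flatMap_map]

-- ===== VERDICT (by name: the statement is the Claim_ definition above) =====
theorem possible_coins_spec : Claim_equal_possible_coins := by
  intro n _
  show possible_coins n = possible_coins_alt n
  unfold possible_coins possible_coins_alt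
  rw [pvFoldl_const, PySem.List.length_pyRange_one, pvIter_eq]
  have h2 : (n - 2 - 0).toNat = (n - 2).toNat := by omega
  rw [h2]
  simp [List.map_map, Function.comp]
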